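-- pv_equiv track=rewrite | github.com/jamesconstable/aoc2021 | day17.py | y_values_by_t
-- ===== SOURCE A (Python) =====
-- from collections import defaultdict
-- from typing import Dict, Iterable, List, Tuple
--
-- def y_values_by_t(target_lower: int, target_upper: int, search_upper: int) \
--         -> Dict[int, List[int]]:
--     '''
--     Returns all initial y velocities that put the probe within the target range
--     at some timestep(s), grouped by those timestep(s).
--     '''
--     y_values = defaultdict(list)
--     for init_y in range(target_lower, search_upper):
--         t = 1
--         height = init_y
--         dy = init_y-1
--         while height >= target_lower:
--             if target_upper >= height:
--                 y_values[t].append(init_y)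
--             height += dy
--             dy -= 1
--             t += 1
--     return y_values
-- ===== SOURCE B (Python) =====
-- from collections import defaultdict
--
--
-- def _isqrt(n):
--     '''Floor square root of a nonnegative int (Newton's method).'''
--     if n == 0:
--         return 0
--     x = 1 << ((n.bit_length() + 1) // 2)
--     y = (x + n // x) // 2
--     while y < x:
--         x = y
--         y = (x + n // x) // 2
--     return x
--
--
-- def y_values_by_t(target_lower, target_upper, search_upper):
--     '''
--     Returns all initial y velocities that put the probe within the target range
--     at some timestep(s), grouped by those timestep(s).
--
--     Instead of simulating the trajectory, solves the quadratic inequalities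
--     target_lower <= h(t) <= target_upper, h(t) = init_y*t - t*(t-1)/2,
--     for integer t, and emits the valid timesteps directly.
--     '''
--     y_values = defaultdict(list)
--     for init_y in range(target_lower, search_upper):
--         a = 2 * init_y + 1
--         # largest t with h(t) >= target_lower (h(1) >= target_lower holds here)
--         t_end = (a + _isqrt(a * a - 8 * target_lower)) // 2
--         e2 = a * a - 8 * target_upper
--         if e2 <= 0:
--             ts = range(1, t_end + 1)
--         else:
--             s = _isqrt(e2)
--             e = s if s * s == e2 else s + 1
--             t1 = (a - e) // 2          # h(t) <= target_upper for t <= t1 ...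
--             t2 = (a + e + 1) // 2      # ... or t >= t2
--             ts = list(range(1, min(t1, t_end) + 1)) \
--                 + list(range(max(t2, 1), t_end + 1))
--         for t in ts:
--             y_values[t].append(init_y)
--     return y_values
-- ===== Notes on version B (the rewrite author's own statement) =====
-- stated objective: alternative
-- what changed: Instead of simulating each trajectory step by step until it falls below the target, B solves the quadratic inequalities target_lower <= y*t - t(t-1)/2 <= target_upper for integer t (integer square roots via Newton's method) and emits exactly the valid timesteps per initial velocity.
import Mathlib
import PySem

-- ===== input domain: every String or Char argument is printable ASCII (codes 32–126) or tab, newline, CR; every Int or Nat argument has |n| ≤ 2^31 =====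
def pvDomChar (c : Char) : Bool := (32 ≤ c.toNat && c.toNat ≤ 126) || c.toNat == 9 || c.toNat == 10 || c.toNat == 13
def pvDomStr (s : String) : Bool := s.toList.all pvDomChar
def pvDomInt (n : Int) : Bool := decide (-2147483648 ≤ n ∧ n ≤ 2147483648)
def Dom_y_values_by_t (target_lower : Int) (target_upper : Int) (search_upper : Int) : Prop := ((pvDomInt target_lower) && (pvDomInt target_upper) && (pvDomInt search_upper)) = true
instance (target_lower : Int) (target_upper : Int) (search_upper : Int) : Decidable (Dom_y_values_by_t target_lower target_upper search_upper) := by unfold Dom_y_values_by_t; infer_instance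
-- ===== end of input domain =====

-- B replaces A's per-velocity step-by-step trajectory simulation by solving the quadratic
-- inequalities target_lower ≤ y·t − t(t−1)/2 ≤ target_upper for integer t (integer square
-- root via Newton's method), emitting exactly the valid timesteps directly.

-- ===== PORT A =====

-- the body of 'while height >= target_lower: …' (carries the dict)
def pvInnerA (L U y : Int) (t height dy : Int) (d : PySem.Dict Int (List Int)) :
    PySem.Dict Int (List Int) :=
  if L ≤ height then
    pvInnerA L U y (t + 1) (height + dy) (dy - 1)
      (if U ≥ height then d.modify t [] (· ++ [y]) else d)
  else d
termination_by ((dy + 1).toNat, (height + 1 - L).toNat)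
decreasing_by
  by_cases hdy : 0 ≤ dy
  · exact Prod.Lex.left _ _ (by omega)
  · have h1 : (dy - 1 + 1).toNat = (dy + 1).toNat := by omega
    rw [h1]
    exact Prod.Lex.right _ (by omega)

def y_values_by_t (target_lower : Int) (target_upper : Int) (search_upper : Int) :
    List (Int × List Int) :=
  ((PySem.List.pyRange target_lower search_upper 1).foldl
      (fun d init_y => pvInnerA target_lower target_upper init_y 1 init_y (init_y - 1) d)
      PySem.Dict.empty).items

-- ===== PORT B =====

-- Source B's _isqrt Newton loop; transcribed over Nat (Python's // on the nonnegative ints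
-- involved is Nat division), exact for the nonnegative arguments B feeds it
def pvNewton (n x : Nat) : Nat :=
  let y := (x + n / x) / 2
  if y < x then pvNewton n y else x
termination_by x
decreasing_by omega

def pvIsqrt (n : Int) : Int :=
  if n = 0 then 0
  else ((pvNewton n.toNat (1 <<< ((n.toNat.log2 + 1 + 1) / 2)) : Nat) : Int)

-- the body of B's 'for init_y in range(...)' loop
def pvInnerB (L U : Int) (d : PySem.Dict Int (List Int)) (init_y : Int) :
    PySem.Dict Int (List Int) :=
  let a := 2 * init_y + 1
  let tEnd := PySem.Int.floordiv (a + pvIsqrt (a * a - 8 * L)) 2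
  let e2 := a * a - 8 * U
  let ts :=
    if e2 ≤ 0 then PySem.List.pyRange 1 (tEnd + 1) 1
    else
      let s := pvIsqrt e2
      let e := if s * s = e2 then s else s + 1
      let t1 := PySem.Int.floordiv (a - e) 2
      let t2 := PySem.Int.floordiv (a + e + 1) 2
      PySem.List.pyRange 1 (min t1 tEnd + 1) 1 ++ PySem.List.pyRange (max t2 1) (tEnd + 1) 1
  ts.foldl (fun d t => d.modify t [] (· ++ [init_y])) d

def y_values_by_t_alt (target_lower : Int) (target_upper : Int) (search_upper : Int) :
    List (Int × List Int) :=
  ((PySem.List.pyRange target_lower search_upper 1).foldl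
      (pvInnerB target_lower target_upper) PySem.Dict.empty).items

-- ===== PRECONDITION & SPEC =====
def Spec_y_values_by_t (target_lower : Int) (target_upper : Int) (search_upper : Int) (out : List (Int × List Int)) : Prop := out = y_values_by_t_alt target_lower target_upper search_upper
instance (target_lower : Int) (target_upper : Int) (search_upper : Int) (out : List (Int × List Int)) : Decidable (Spec_y_values_by_t target_lower target_upper search_upper out) := by unfold Spec_y_values_by_t; infer_instance

-- ===== CLAIM (what is proved, stated in full; the proofs are below) =====
def Claim_equal_y_values_by_t : Prop := ∀ (target_lower : Int) (target_upper : Int) (search_upper : Int), Dom_y_values_by_t target_lower target_upper search_upper → Spec_y_values_by_t target_lower target_upper search_upper (y_values_by_t target_lower target_upper search_upper)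

-- ===== LEMMAS AND PROOFS =====

-- Newton's iteration computes the floor square root
theorem pvNewton_eq_sqrt (n : Nat) (hn : 1 ≤ n) :
    ∀ x, Nat.sqrt n ≤ x → 1 ≤ x → pvNewton n x = Nat.sqrt n := by
  intro x
  induction x using Nat.strong_induction_on with
  | _ x ih =>
    intro hsx hx1
    rw [pvNewton]
    have hs1 : 1 ≤ Nat.sqrt n := Nat.sqrt_pos.mpr hn
    have hmod := Nat.div_add_mod n x
    have hmlt : n % x < x := Nat.mod_lt n (by omega)
    have hsq : Nat.sqrt n * Nat.sqrt n ≤ n := Nat.sqrt_le n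
    have hy_ge : Nat.sqrt n ≤ (x + n / x) / 2 := by
      have key : 2 * Nat.sqrt n ≤ x + n / x := by
        by_contra hcon
        push_neg at hcon
        have h1 : x * (n / x) + x ≥ n + 1 := by omega
        zify at hcon h1 hsq hsx hx1 ⊢
        nlinarith [sq_nonneg ((x : Int) - (Nat.sqrt n : Int))]
      omega
    by_cases hxy : (x + n / x) / 2 < x
    · simp only [hxy, if_true]
      exact ih _ hxy hy_ge (by omega)
    · simp only [hxy, if_false]
      have hxs : x ≤ Nat.sqrt n := by
        by_contra hgt
        push_neg at hgt
        have hnx : n < x * x := by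
          calc n < (Nat.sqrt n + 1) * (Nat.sqrt n + 1) := Nat.lt_succ_sqrt n
          _ ≤ x * x := Nat.mul_le_mul (by omega) (by omega)
        have hqx : n / x < x := Nat.div_lt_iff_lt_mul (by omega) |>.mpr hnx
        omega
      omega

theorem pvIsqrt_spec (n : Int) (hn : 0 ≤ n) :
    pvIsqrt n = (Nat.sqrt n.toNat : Int) := by
  unfold pvIsqrt
  by_cases h0 : n = 0
  · simp [h0]
  · rw [if_neg h0]
    have hpow : (1 : Nat) <<< ((n.toNat.log2 + 1 + 1) / 2) = 2 ^ ((n.toNat.log2 + 1 + 1) / 2) := by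
      simp [Nat.shiftLeft_eq]
    have hlt : n.toNat < 2 ^ ((n.toNat.log2 + 1 + 1) / 2) * 2 ^ ((n.toNat.log2 + 1 + 1) / 2) := by
      calc n.toNat < 2 ^ (n.toNat.log2 + 1) := Nat.lt_log2_self
      _ ≤ 2 ^ (((n.toNat.log2 + 1 + 1) / 2) + ((n.toNat.log2 + 1 + 1) / 2)) :=
          Nat.pow_le_pow_right (by norm_num) (by omega)
      _ = _ := by rw [pow_add]
    rw [← pow_two] at hlt
    have hsq : Nat.sqrt n.toNat < 2 ^ ((n.toNat.log2 + 1 + 1) / 2) := Nat.sqrt_lt'.mpr hlt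
    rw [pvNewton_eq_sqrt n.toNat (by omega) _ (by rw [hpow]; omega)
      (by rw [hpow]; exact Nat.one_le_two_pow)]

-- bracket for pvIsqrt on nonnegative input
theorem pvIsqrt_bounds (n : Int) (hn : 0 ≤ n) :
    0 ≤ pvIsqrt n ∧ pvIsqrt n * pvIsqrt n ≤ n ∧ n < (pvIsqrt n + 1) * (pvIsqrt n + 1) := by
  rw [pvIsqrt_spec n hn]
  refine ⟨by positivity, ?_, ?_⟩
  · have := Nat.sqrt_le n.toNat
    zify at this; omega
  · have := Nat.lt_succ_sqrt n.toNat
    zify at this; omega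

-- lower-bound characterisation: for t ≥ 1 and L ≤ y, height(t) ≥ L ⟺ t ≤ tEnd
theorem pv_lower_char (L y t : Int) (hLy : L ≤ y) (ht : 1 ≤ t) :
    (2 * L ≤ 2 * y * t - t * t + t) ↔
      t ≤ PySem.Int.floordiv ((2 * y + 1) + pvIsqrt ((2 * y + 1) * (2 * y + 1) - 8 * L)) 2 := by
  set a := 2 * y + 1 with ha
  have hkey : (2 * t - a) * (2 * t - a) = a * a - 4 * (2 * y * t - t * t + t) := by
    rw [ha]; ring
  have ha2 : (a - 2) * (a - 2) = a * a - 8 * y := by rw [ha]; ring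
  have hD : (0:Int) ≤ a * a - 8 * L := by
    have := mul_self_nonneg (a - 2)
    linarith
  obtain ⟨hs0, hs1, hs2⟩ := pvIsqrt_bounds _ hD
  set s := pvIsqrt (a * a - 8 * L) with hs
  have hTb := (PySem.Int.floordiv_eq_iff_of_pos (a := a + s) (b := 2) (by norm_num)).mp rfl
  set T := PySem.Int.floordiv (a + s) 2 with hT
  clear_value a s T
  constructor
  · intro h
    have hsq : (2 * t - a) * (2 * t - a) ≤ a * a - 8 * L := by linarith
    by_cases hpos : 0 ≤ 2 * t - a
    · have hle : 2 * t - a ≤ s := by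
        by_contra hc
        push_neg at hc
        have := mul_self_le_mul_self (by linarith : (0:Int) ≤ s + 1) (by linarith : s + 1 ≤ 2 * t - a)
        linarith
      omega
    · omega
  · intro h
    have hsq : (2 * t - a) * (2 * t - a) ≤ a * a - 8 * L := by
      by_cases hpos : 0 ≤ 2 * t - a
      · have hle : 2 * t - a ≤ s := by omega
        have := mul_self_le_mul_self hpos hle
        linarith
      · have hm := mul_self_le_mul_self (show (0:Int) ≤ a - 2 * t by omega)
          (show a - 2 * t ≤ a - 2 by omega)
        have hflip : (a - 2 * t) * (a - 2 * t) = (2 * t - a) * (2 * t - a) := by ring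
        linarith
    linarith

-- the ceiling square root e used by B: 1 ≤ e, e2 ≤ e², (e-1)² < e2
theorem pv_ceil_bounds (e2 : Int) (h : 0 < e2) :
    1 ≤ (if pvIsqrt e2 * pvIsqrt e2 = e2 then pvIsqrt e2 else pvIsqrt e2 + 1) ∧
    e2 ≤ (if pvIsqrt e2 * pvIsqrt e2 = e2 then pvIsqrt e2 else pvIsqrt e2 + 1) *
         (if pvIsqrt e2 * pvIsqrt e2 = e2 then pvIsqrt e2 else pvIsqrt e2 + 1) ∧
    ((if pvIsqrt e2 * pvIsqrt e2 = e2 then pvIsqrt e2 else pvIsqrt e2 + 1) - 1) *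
    ((if pvIsqrt e2 * pvIsqrt e2 = e2 then pvIsqrt e2 else pvIsqrt e2 + 1) - 1) < e2 := by
  obtain ⟨hs0, hs1, hs2⟩ := pvIsqrt_bounds e2 (le_of_lt h)
  set s := pvIsqrt e2 with hs
  clear_value s
  by_cases hexact : s * s = e2
  · simp only [if_pos hexact]
    have hs1' : 1 ≤ s := by nlinarith
    exact ⟨hs1', by omega, by nlinarith⟩
  · simp only [if_neg hexact]
    exact ⟨by omega, by nlinarith, by simpa using lt_of_le_of_ne hs1 hexact⟩

-- upper-bound characterisation (the branch e2 > 0)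
theorem pv_upper_char (U y t : Int)
    (he2 : 0 < (2 * y + 1) * (2 * y + 1) - 8 * U) :
    (2 * y * t - t * t + t ≤ 2 * U) ↔
      (t ≤ PySem.Int.floordiv ((2 * y + 1) -
            (if pvIsqrt ((2 * y + 1) * (2 * y + 1) - 8 * U) * pvIsqrt ((2 * y + 1) * (2 * y + 1) - 8 * U) = (2 * y + 1) * (2 * y + 1) - 8 * U
             then pvIsqrt ((2 * y + 1) * (2 * y + 1) - 8 * U)
             else pvIsqrt ((2 * y + 1) * (2 * y + 1) - 8 * U) + 1)) 2 ∨
       PySem.Int.floordiv ((2 * y + 1) +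
            (if pvIsqrt ((2 * y + 1) * (2 * y + 1) - 8 * U) * pvIsqrt ((2 * y + 1) * (2 * y + 1) - 8 * U) = (2 * y + 1) * (2 * y + 1) - 8 * U
             then pvIsqrt ((2 * y + 1) * (2 * y + 1) - 8 * U)
             else pvIsqrt ((2 * y + 1) * (2 * y + 1) - 8 * U) + 1) + 1) 2 ≤ t) := by
  set a := 2 * y + 1 with ha
  have hkey : (2 * t - a) * (2 * t - a) = a * a - 4 * (2 * y * t - t * t + t) := by
    rw [ha]; ring
  obtain ⟨he1, heup, helow⟩ := pv_ceil_bounds _ he2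
  set s := pvIsqrt (a * a - 8 * U) with hs
  set e := if s * s = a * a - 8 * U then s else s + 1 with he
  have hT1 := (PySem.Int.floordiv_eq_iff_of_pos (a := a - e) (b := 2) (by norm_num)).mp rfl
  have hT2 := (PySem.Int.floordiv_eq_iff_of_pos (a := a + e + 1) (b := 2) (by norm_num)).mp rfl
  set t1 := PySem.Int.floordiv (a - e) 2 with ht1
  set t2 := PySem.Int.floordiv (a + e + 1) 2 with ht2
  clear_value a s e t1 t2
  constructor
  · intro h
    have hsq : a * a - 8 * U ≤ (2 * t - a) * (2 * t - a) := by linarith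
    by_contra hc
    push_neg at hc
    obtain ⟨hc1, hc2⟩ := hc
    have hb1 : -(e - 1) ≤ 2 * t - a := by omega
    have hb2 : 2 * t - a ≤ e - 1 := by omega
    have hmul : 0 ≤ (e - 1 - (2 * t - a)) * (e - 1 + (2 * t - a)) :=
      mul_nonneg (by linarith) (by linarith)
    nlinarith
  · intro h
    have hflip : (a - 2 * t) * (a - 2 * t) = (2 * t - a) * (2 * t - a) := by ring
    have hsq : a * a - 8 * U ≤ (2 * t - a) * (2 * t - a) := by
      rcases h with h | h
      · have h1 : e ≤ a - 2 * t := by omega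
        have := mul_self_le_mul_self (by linarith : (0:Int) ≤ e) h1
        linarith
      · have h1 : e ≤ 2 * t - a := by omega
        have := mul_self_le_mul_self (by linarith : (0:Int) ≤ e) h1
        linarith
    linarith

-- A's while loop, seen as a fold of appends over the filtered timestep range
theorem pvInnerA_spec (L U y : Int) (hLy : L ≤ y) :
    ∀ (n : Nat) (t height dy : Int) (d : PySem.Dict Int (List Int)),
      1 ≤ t → 2 * height = 2 * y * t - t * t + t → dy = y - t →
      ((PySem.Int.floordiv ((2 * y + 1) + pvIsqrt ((2 * y + 1) * (2 * y + 1) - 8 * L)) 2 + 1 - t).toNat ≤ n) →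
      pvInnerA L U y t height dy d =
        ((PySem.List.pyRange t (PySem.Int.floordiv ((2 * y + 1) + pvIsqrt ((2 * y + 1) * (2 * y + 1) - 8 * L)) 2 + 1) 1).filter
            (fun t => decide (2 * y * t - t * t + t ≤ 2 * U))).foldl
          (fun d t => d.modify t [] (· ++ [y])) d := by
  set T := PySem.Int.floordiv ((2 * y + 1) + pvIsqrt ((2 * y + 1) * (2 * y + 1) - 8 * L)) 2 with hT
  clear_value T
  intro n
  induction n with
  | zero =>
    intro t h dy d ht hh hdy hn
    have hlt : ¬ L ≤ h := by
      intro hLh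
      have := (pv_lower_char L y t hLy ht).mp (by linarith)
      rw [← hT] at this
      omega
    rw [pvInnerA, if_neg hlt, PySem.List.pyRange_one_eq_nil (by omega), List.filter_nil,
      List.foldl_nil]
  | succ n ih =>
    intro t h dy d ht hh hdy hn
    by_cases hLh : L ≤ h
    · have htT : t ≤ T := by
        have := (pv_lower_char L y t hLy ht).mp (by linarith)
        rwa [← hT] at this
      rw [pvInnerA, if_pos hLh, PySem.List.pyRange_one_cons (by omega), List.filter_cons]
      have harith : 2 * (h + dy) = 2 * y * (t + 1) - (t + 1) * (t + 1) + (t + 1) := by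
        linear_combination hh + 2 * hdy
      by_cases hU : 2 * y * t - t * t + t ≤ 2 * U
      · rw [if_pos (show U ≥ h by linarith)]
        simp only [decide_eq_true hU, if_true, List.foldl_cons]
        exact ih (t + 1) (h + dy) (dy - 1) _ (by omega) harith (by omega) (by omega)
      · rw [if_neg (show ¬ U ≥ h by intro hc; exact hU (by linarith))]
        simp only [decide_eq_false hU, Bool.false_eq_true, if_false]
        exact ih (t + 1) (h + dy) (dy - 1) _ (by omega) harith (by omega) (by omega)
    · have htT : ¬ t ≤ T := fun hc => hLh (by
        rw [hT] at hc
        have := (pv_lower_char L y t hLy ht).mpr hc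
        linarith)
      rw [pvInnerA, if_neg hLh, PySem.List.pyRange_one_eq_nil (by omega), List.filter_nil,
        List.foldl_nil]

-- filtering an all-true predicate, and filtering a two-interval predicate, over a range
theorem pv_filter_split (T t1 t2 : Int) (hT : 1 ≤ T) (h12 : t1 < t2) (p : Int → Bool)
    (hchar : ∀ t, 1 ≤ t → (p t = true ↔ (t ≤ t1 ∨ t2 ≤ t))) :
    (PySem.List.pyRange 1 (T + 1) 1).filter p =
      PySem.List.pyRange 1 (min t1 T + 1) 1 ++ PySem.List.pyRange (max t2 1) (T + 1) 1 := by
  have hsplit1 : PySem.List.pyRange 1 (T + 1) 1 =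
      PySem.List.pyRange 1 (max 1 (min (t1 + 1) (T + 1))) 1 ++
      PySem.List.pyRange (max 1 (min (t1 + 1) (T + 1))) (T + 1) 1 :=
    PySem.List.pyRange_one_append _ _ _ (by omega) (by omega)
  have hsplit2 : PySem.List.pyRange (max 1 (min (t1 + 1) (T + 1))) (T + 1) 1 =
      PySem.List.pyRange (max 1 (min (t1 + 1) (T + 1))) (max 1 (min t2 (T + 1))) 1 ++
      PySem.List.pyRange (max 1 (min t2 (T + 1))) (T + 1) 1 :=
    PySem.List.pyRange_one_append _ _ _ (by omega) (by omega)
  rw [hsplit1, hsplit2, List.filter_append, List.filter_append]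
  have hp1 : (PySem.List.pyRange 1 (max 1 (min (t1 + 1) (T + 1))) 1).filter p =
      PySem.List.pyRange 1 (max 1 (min (t1 + 1) (T + 1))) 1 := by
    apply List.filter_eq_self.mpr
    intro t htmem
    have hmem := PySem.List.mem_pyRange_one.mp htmem
    exact (hchar t (by omega)).mpr (Or.inl (by omega))
  have hp2 : (PySem.List.pyRange (max 1 (min (t1 + 1) (T + 1))) (max 1 (min t2 (T + 1))) 1).filter p = [] := by
    apply List.filter_eq_nil_iff.mpr
    intro t htmem
    have hmem := PySem.List.mem_pyRange_one.mp htmem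
    intro hc
    rcases (hchar t (by omega)).mp hc with h | h <;> omega
  have hp3 : (PySem.List.pyRange (max 1 (min t2 (T + 1))) (T + 1) 1).filter p =
      PySem.List.pyRange (max 1 (min t2 (T + 1))) (T + 1) 1 := by
    apply List.filter_eq_self.mpr
    intro t htmem
    have hmem := PySem.List.mem_pyRange_one.mp htmem
    exact (hchar t (by omega)).mpr (Or.inr (by omega))
  rw [hp1, hp2, hp3, List.nil_append]
  have hq1 : PySem.List.pyRange 1 (max 1 (min (t1 + 1) (T + 1))) 1 =
      PySem.List.pyRange 1 (min t1 T + 1) 1 := by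
    by_cases hcc : 1 ≤ min t1 T + 1
    · congr 1
      omega
    · rw [PySem.List.pyRange_one_eq_nil (by omega), PySem.List.pyRange_one_eq_nil (by omega)]
  have hq2 : PySem.List.pyRange (max 1 (min t2 (T + 1))) (T + 1) 1 =
      PySem.List.pyRange (max t2 1) (T + 1) 1 := by
    by_cases hcc : t2 ≤ T + 1
    · congr 1
      omega
    · rw [PySem.List.pyRange_one_eq_nil (by omega), PySem.List.pyRange_one_eq_nil (by omega)]
  rw [hq1, hq2]

theorem pv_filter_all (T : Int) (p : Int → Bool) (hchar : ∀ t, 1 ≤ t → t ≤ T → p t = true) :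
    (PySem.List.pyRange 1 (T + 1) 1).filter p = PySem.List.pyRange 1 (T + 1) 1 := by
  apply List.filter_eq_self.mpr
  intro t htmem
  have hmem := PySem.List.mem_pyRange_one.mp htmem
  exact hchar t (by omega) (by omega)

-- the filtered range equals B's explicit range expression
theorem pv_filter_eq_ts (L U y : Int) (hLy : L ≤ y) :
    ((PySem.List.pyRange 1 (PySem.Int.floordiv ((2 * y + 1) + pvIsqrt ((2 * y + 1) * (2 * y + 1) - 8 * L)) 2 + 1) 1).filter
        (fun t => decide (2 * y * t - t * t + t ≤ 2 * U))) =
      (let a := 2 * y + 1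
       let tEnd := PySem.Int.floordiv (a + pvIsqrt (a * a - 8 * L)) 2
       let e2 := a * a - 8 * U
       if e2 ≤ 0 then PySem.List.pyRange 1 (tEnd + 1) 1
       else
         let s := pvIsqrt e2
         let e := if s * s = e2 then s else s + 1
         let t1 := PySem.Int.floordiv (a - e) 2
         let t2 := PySem.Int.floordiv (a + e + 1) 2
         PySem.List.pyRange 1 (min t1 tEnd + 1) 1 ++ PySem.List.pyRange (max t2 1) (tEnd + 1) 1) := by
  show _ = (if (2 * y + 1) * (2 * y + 1) - 8 * U ≤ 0 then _ else _)
  have hT1le : 1 ≤ PySem.Int.floordiv ((2 * y + 1) + pvIsqrt ((2 * y + 1) * (2 * y + 1) - 8 * L)) 2 :=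
    (pv_lower_char L y 1 hLy le_rfl).mp (by linarith)
  by_cases he2 : (2 * y + 1) * (2 * y + 1) - 8 * U ≤ 0
  · rw [if_pos he2]
    apply pv_filter_all _ _ ?_
    intro t _ _
    simp only [decide_eq_true_eq]
    have hkey : (2 * t - (2 * y + 1)) * (2 * t - (2 * y + 1)) =
        (2 * y + 1) * (2 * y + 1) - 4 * (2 * y * t - t * t + t) := by ring
    have := mul_self_nonneg (2 * t - (2 * y + 1))
    linarith
  · rw [if_neg he2]
    push_neg at he2
    have hchar := fun t => pv_upper_char U y t he2
    obtain ⟨he1, heup, helow⟩ := pv_ceil_bounds _ he2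
    have hB1 := (PySem.Int.floordiv_eq_iff_of_pos
      (a := (2 * y + 1) - (if pvIsqrt ((2 * y + 1) * (2 * y + 1) - 8 * U) * pvIsqrt ((2 * y + 1) * (2 * y + 1) - 8 * U) = (2 * y + 1) * (2 * y + 1) - 8 * U then pvIsqrt ((2 * y + 1) * (2 * y + 1) - 8 * U) else pvIsqrt ((2 * y + 1) * (2 * y + 1) - 8 * U) + 1))
      (b := 2) (by norm_num)).mp rfl
    have hB2 := (PySem.Int.floordiv_eq_iff_of_pos
      (a := (2 * y + 1) + (if pvIsqrt ((2 * y + 1) * (2 * y + 1) - 8 * U) * pvIsqrt ((2 * y + 1) * (2 * y + 1) - 8 * U) = (2 * y + 1) * (2 * y + 1) - 8 * U then pvIsqrt ((2 * y + 1) * (2 * y + 1) - 8 * U) else pvIsqrt ((2 * y + 1) * (2 * y + 1) - 8 * U) + 1) + 1)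
      (b := 2) (by norm_num)).mp rfl
    apply pv_filter_split _ _ _ hT1le (by omega) _ ?_
    intro t _
    simp only [decide_eq_true_eq]
    exact hchar t

-- per-velocity agreement of the two loop bodies
theorem pvInner_eq (L U y : Int) (hLy : L ≤ y) (d : PySem.Dict Int (List Int)) :
    pvInnerA L U y 1 y (y - 1) d = pvInnerB L U d y := by
  unfold pvInnerB
  simp only
  rw [pvInnerA_spec L U y hLy
      (PySem.Int.floordiv ((2 * y + 1) + pvIsqrt ((2 * y + 1) * (2 * y + 1) - 8 * L)) 2 + 1 - 1).toNat
      1 y (y - 1) d le_rfl (by ring) (by ring) le_rfl]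
  rw [pv_filter_eq_ts L U y hLy]

-- ===== VERDICT (by name: the statement is the Claim_ definition above) =====
theorem y_values_by_t_spec : Claim_equal_y_values_by_t := by
  intro L U su _
  unfold Spec_y_values_by_t y_values_by_t y_values_by_t_alt
  congr 1
  apply PySem.List.foldl_congr_mem
  intro d y hy
  exact pvInner_eq L U y (PySem.List.mem_pyRange_one.mp hy).1 d
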